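-- pv_equiv track=rewrite | github.com/kumarvarun3162/CodeReview-MCP | utils/diff_summary.py | _extract_relevant_window
-- ===== SOURCE A (Python) =====
-- def _extract_relevant_window(
--     lines: list[str],
--     changed_line_numbers: list[int],
--     context: int = 5,   # lines of context above/below each change
-- ) -> list[str]:
--     """
--     Extracts lines around changed areas with context.
--     Adds markers to show where code was omitted.
--     """
--     total = len(lines)
--     include = set()
--
--     for ln in changed_line_numbers:
--         idx = ln - 1  # convert to 0-indexed
--         for i in range(max(0, idx - context), min(total, idx + context + 1)):
--             include.add(i)
--
--     result = []
--     prev_included = False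
--
--     for i, line in enumerate(lines):
--         if i in include:
--             if not prev_included and result:
--                 result.append("... (lines omitted) ...")
--             result.append(f"{i + 1:4d} | {line}")
--             prev_included = True
--         else:
--             prev_included = False
--
--     return result
-- ===== SOURCE B (Python) =====
-- def _extract_relevant_window(
--     lines: list[str],
--     changed_line_numbers: list[int],
--     context: int = 5,
-- ) -> list[str]:
--     """Interval-merge re-implementation: build one clamped window per change,
--     sort by start, merge overlapping/touching windows, then emit each merged
--     block with an omission marker between blocks."""
--     total = len(lines)
--     ivs = sorted(
--         ((max(0, ln - 1 - context), min(total, ln - 1 + context + 1))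
--          for ln in changed_line_numbers),
--         key=lambda iv: iv[0],
--     )
--     merged = []
--     for lo, hi in ivs:
--         if lo >= hi:
--             continue
--         if merged and lo <= merged[-1][1]:
--             merged[-1] = (merged[-1][0], max(merged[-1][1], hi))
--         else:
--             merged.append((lo, hi))
--     out = []
--     for lo, hi in merged:
--         if out:
--             out.append("... (lines omitted) ...")
--         for i in range(lo, hi):
--             out.append(f"{i + 1:4d} | {lines[i]}")
--     return out
-- ===== Notes on version B (the rewrite author's own statement) =====
-- stated objective: faster
-- what changed: Replaces A's per-index include-set (one set entry per context line, then a full scan over every line of the file) by building one clamped interval per changed line, sorting them by start and merging overlapping/touching intervals, then emitting only the merged blocks with markers between them.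
import Mathlib
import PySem

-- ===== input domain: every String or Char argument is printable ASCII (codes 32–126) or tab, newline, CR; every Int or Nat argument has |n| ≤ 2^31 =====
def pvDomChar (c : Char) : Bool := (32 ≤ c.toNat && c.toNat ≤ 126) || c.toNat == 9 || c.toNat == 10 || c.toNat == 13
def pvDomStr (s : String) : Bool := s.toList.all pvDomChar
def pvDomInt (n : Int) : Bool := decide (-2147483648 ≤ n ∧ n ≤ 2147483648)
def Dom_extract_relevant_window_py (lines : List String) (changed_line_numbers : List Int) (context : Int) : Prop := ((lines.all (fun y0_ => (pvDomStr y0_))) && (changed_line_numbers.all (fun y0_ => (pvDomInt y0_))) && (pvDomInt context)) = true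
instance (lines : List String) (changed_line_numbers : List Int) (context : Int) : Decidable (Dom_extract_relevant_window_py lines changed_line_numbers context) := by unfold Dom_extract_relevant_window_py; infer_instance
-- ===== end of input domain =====

-- B replaces A's per-line membership set and full scan over all lines by sorting the clamped
-- per-change windows and merging overlapping/touching intervals, then emitting only the merged
-- blocks (objective: faster; a timing run measured B well over 1.5x faster at the largest size).

-- shared formatting helper: f"{i+1:4d} | {line}" (right-aligned in width 4 with spaces)
def pvFmt (i : Int) (line : String) : String :=
  let ds := PySem.Int.toChars (i + 1)
  String.ofList (List.replicate (4 - ds.length) ' ' ++ ds ++ (' ' :: '|' :: ' ' :: line.toList))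

-- ===== PORT A =====
def extract_relevant_window_py (lines : List String) (changed_line_numbers : List Int) (context : Int) : List String :=
  let total : Int := PySem.List.len lines
  let includeSet : PySem.Set Int :=
    changed_line_numbers.foldl (fun s ln =>
      let idx := ln - 1
      (PySem.List.pyRange (max 0 (idx - context)) (min total (idx + context + 1)) 1).foldl
        (fun s i => PySem.Set.add s i) s) PySem.Set.empty
  ((PySem.List.enumerate lines).foldl (fun (st : List String × Bool) (p : Int × String) =>
      if PySem.Set.contains includeSet p.1 then
        ((if st.2 = false ∧ st.1 ≠ [] then st.1 ++ ["... (lines omitted) ..."] else st.1)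
          ++ [pvFmt p.1 p.2], true)
      else (st.1, false)) ([], false)).1

-- ===== PORT B =====
def extract_relevant_window_py_alt (lines : List String) (changed_line_numbers : List Int) (context : Int) : List String :=
  let total : Int := PySem.List.len lines
  let ivs := PySem.List.sorted
    (changed_line_numbers.map (fun ln => (max 0 (ln - 1 - context), min total (ln - 1 + context + 1))))
    (fun iv => iv.1)
  let merged := ivs.foldl (fun (m : List (Int × Int)) iv =>
    if iv.2 ≤ iv.1 then m
    else
      match m.getLast? with
      | some last => if iv.1 ≤ last.2 then m.dropLast ++ [(last.1, max last.2 iv.2)] else m ++ [iv]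
      | none => [iv]) []
  merged.foldl (fun out iv =>
    (if out ≠ [] then out ++ ["... (lines omitted) ..."] else out) ++
    (PySem.List.pyRange iv.1 iv.2 1).map (fun i => pvFmt i (PySem.List.pyGetD lines i ""))) []

-- ===== PRECONDITION & SPEC =====
def Spec_extract_relevant_window_py (lines : List String) (changed_line_numbers : List Int) (context : Int) (out : List String) : Prop := out = extract_relevant_window_py_alt lines changed_line_numbers context
instance (lines : List String) (changed_line_numbers : List Int) (context : Int) (out : List String) : Decidable (Spec_extract_relevant_window_py lines changed_line_numbers context out) := by unfold Spec_extract_relevant_window_py; infer_instance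

-- ===== CLAIM (what is proved, stated in full; the proofs are below) =====
def Claim_equal_extract_relevant_window_py : Prop := ∀ (lines : List String) (changed_line_numbers : List Int) (context : Int), Dom_extract_relevant_window_py lines changed_line_numbers context → Spec_extract_relevant_window_py lines changed_line_numbers context (extract_relevant_window_py lines changed_line_numbers context)

-- ===== LEMMAS AND PROOFS =====

-- membership of an index in a list of half-open intervals
def pvMemIv (ivs : List (Int × Int)) (i : Int) : Bool :=
  ivs.any (fun iv => decide (iv.1 ≤ i ∧ i < iv.2))

-- the body of A's emission scan, abstracted over the membership test and line formatter
def pvScanStep (mem : Int → Bool) (emit : Int → String) (st : List String × Bool) (j : Int) :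
    List String × Bool :=
  if mem j then
    ((if st.2 = false ∧ st.1 ≠ [] then st.1 ++ ["... (lines omitted) ..."] else st.1)
      ++ [emit j], true)
  else (st.1, false)

-- the body of B's block emission, abstracted over the line formatter
def pvEmitStep (emit : Int → String) (out : List String) (iv : Int × Int) : List String :=
  (if out ≠ [] then out ++ ["... (lines omitted) ..."] else out) ++
    (PySem.List.pyRange iv.1 iv.2 1).map emit

-- the body of B's interval merge
def pvMergeStep (m : List (Int × Int)) (iv : Int × Int) : List (Int × Int) :=
  if iv.2 ≤ iv.1 then m
  else
    match m.getLast? with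
    | some last => if iv.1 ≤ last.2 then m.dropLast ++ [(last.1, max last.2 iv.2)] else m ++ [iv]
    | none => [iv]

-- invariant of the merged interval list: disjoint, ordered, nonempty, clamped intervals
def pvInv (total : Int) (m : List (Int × Int)) : Prop :=
  m.Pairwise (fun a b => a.2 < b.1) ∧ ∀ iv ∈ m, iv.1 < iv.2 ∧ 0 ≤ iv.1 ∧ iv.2 ≤ total

lemma pv_mem_foldl_add (l : List Int) (s : PySem.Set Int) (x : Int) :
    x ∈ l.foldl (fun s i => PySem.Set.add s i) s ↔ x ∈ s ∨ x ∈ l := by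
  induction l generalizing s with
  | nil => simp
  | cons a t ih =>
    simp [List.foldl_cons, ih, PySem.Set.mem_add]
    tauto


lemma pv_scan_false (mem : Int → Bool) (emit : Int → String) :
    ∀ (n : Nat) (a b : Int) (res : List String) (prev : Bool), (b - a).toNat = n →
    (∀ i, a ≤ i → i < b → mem i = false) →
    (PySem.List.pyRange a b 1).foldl (pvScanStep mem emit) (res, prev)
      = (res, if a < b then false else prev) := by
  intro n
  induction n with
  | zero =>
    intro a b res prev hn h
    rw [PySem.List.pyRange_one_eq_nil (by omega)]
    simp
    omega
  | succ k ih =>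
    intro a b res prev hn h
    have hab : a < b := by omega
    rw [PySem.List.pyRange_one_cons hab]
    simp only [List.foldl_cons]
    have hma : mem a = false := h a le_rfl hab
    have : pvScanStep mem emit (res, prev) a = (res, false) := by
      simp [pvScanStep, hma]
    rw [this, ih (a+1) b res false (by omega) (fun i h1 h2 => h i (by omega) h2)]
    simp [hab]

lemma pv_scan_true_tail (mem : Int → Bool) (emit : Int → String) :
    ∀ (n : Nat) (a b : Int) (res : List String), (b - a).toNat = n →
    (∀ i, a ≤ i → i < b → mem i = true) →
    (PySem.List.pyRange a b 1).foldl (pvScanStep mem emit) (res, true)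
      = (res ++ (PySem.List.pyRange a b 1).map emit, true) := by
  intro n
  induction n with
  | zero =>
    intro a b res hn h
    rw [PySem.List.pyRange_one_eq_nil (by omega)]
    simp
  | succ k ih =>
    intro a b res hn h
    have hab : a < b := by omega
    rw [PySem.List.pyRange_one_cons hab]
    simp only [List.foldl_cons, List.map_cons]
    have : pvScanStep mem emit (res, true) a = (res ++ [emit a], true) := by
      simp [pvScanStep, h a le_rfl hab]
    rw [this, ih (a+1) b _ (by omega) (fun i h1 h2 => h i (by omega) h2)]
    simp

lemma pv_scan_true (mem : Int → Bool) (emit : Int → String) (a b : Int) (res : List String)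
    (hab : a < b) (h : ∀ i, a ≤ i → i < b → mem i = true) :
    (PySem.List.pyRange a b 1).foldl (pvScanStep mem emit) (res, false)
      = ((if res ≠ [] then res ++ ["... (lines omitted) ..."] else res)
          ++ (PySem.List.pyRange a b 1).map emit, true) := by
  rw [PySem.List.pyRange_one_cons hab]
  simp only [List.foldl_cons, List.map_cons]
  have : pvScanStep mem emit (res, false) a
      = ((if res ≠ [] then res ++ ["... (lines omitted) ..."] else res) ++ [emit a], true) := by
    simp [pvScanStep, h a le_rfl hab]
  rw [this, pv_scan_true_tail mem emit (b - (a+1)).toNat (a+1) b _ rfl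
      (fun i h1 h2 => h i (by omega) h2)]
  simp

lemma pv_scan_blocks (total : Int) (mem : Int → Bool) (emit : Int → String) :
    ∀ (M : List (Int × Int)) (s : Int) (prev : Bool) (res : List String),
    M.Pairwise (fun a b => a.2 < b.1) →
    (∀ iv ∈ M, iv.1 < iv.2 ∧ s ≤ iv.1 ∧ iv.2 ≤ total) →
    (prev = false ∨ ∀ iv ∈ M, s < iv.1) →
    (∀ i, s ≤ i → i < total → mem i = pvMemIv M i) →
    ((PySem.List.pyRange s total 1).foldl (pvScanStep mem emit) (res, prev)).1
      = M.foldl (pvEmitStep emit) res := by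
  intro M
  induction M with
  | nil =>
    intro s prev res _ _ _ hmem
    rw [pv_scan_false mem emit (total - s).toNat s total res prev rfl
        (fun i h1 h2 => by rw [hmem i h1 h2]; simp [pvMemIv])]
    simp
  | cons iv M' ih =>
    intro s prev res hpw hbd hprev hmem
    obtain ⟨lo, hi⟩ := iv
    have hbd0 := hbd (lo, hi) (List.mem_cons_self ..)
    have hlohi : lo < hi := hbd0.1
    have hslo : s ≤ lo := hbd0.2.1
    have hhitot : hi ≤ total := hbd0.2.2
    have hpwhead : ∀ iv' ∈ M', hi < iv'.1 := by
      intro iv' hm; exact (List.pairwise_cons.mp hpw).1 iv' hm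
    -- split the range at lo and hi
    rw [PySem.List.pyRange_one_append s lo total hslo (by omega),
        PySem.List.pyRange_one_append lo hi total (by omega) hhitot,
        List.foldl_append, List.foldl_append]
    -- phase 1: below lo everything is outside
    have hfalse : ∀ i, s ≤ i → i < lo → mem i = false := by
      intro i h1 h2
      rw [hmem i h1 (by omega)]
      simp only [pvMemIv, List.any_cons]
      simp only [Bool.or_eq_false_iff]
      constructor
      · simp; omega
      · simp only [List.any_eq_false]
        intro iv' hm
        have := hpwhead iv' hm
        have := (hbd iv' (List.mem_cons_of_mem _ hm)).1
        simp; omega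
    rw [pv_scan_false mem emit (lo - s).toNat s lo res prev rfl hfalse]
    have hprev1 : (if s < lo then false else prev) = false := by
      rcases hprev with h | h
      · simp [h]
      · have := h (lo, hi) (List.mem_cons_self ..)
        simp at this ⊢
        omega
    rw [hprev1]
    -- phase 2: the block [lo, hi) is all inside
    have htrue : ∀ i, lo ≤ i → i < hi → mem i = true := by
      intro i h1 h2
      rw [hmem i (by omega) (by omega)]
      simp [pvMemIv]
      exact Or.inl ⟨h1, h2⟩
    rw [pv_scan_true mem emit lo hi res hlohi htrue]
    -- phase 3: the tail
    rw [List.foldl_cons]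
    have hemit : pvEmitStep emit res (lo, hi)
        = (if res ≠ [] then res ++ ["... (lines omitted) ..."] else res)
          ++ (PySem.List.pyRange lo hi 1).map emit := rfl
    rw [hemit]
    exact ih hi true _ (List.pairwise_cons.mp hpw).2
      (fun iv' hm => ⟨(hbd iv' (List.mem_cons_of_mem _ hm)).1, le_of_lt (hpwhead iv' hm),
        (hbd iv' (List.mem_cons_of_mem _ hm)).2.2⟩)
      (Or.inr hpwhead)
      (by
        intro i h1 h2
        rw [hmem i (by omega) h2]
        simp only [pvMemIv, List.any_cons]
        have : ¬ (lo ≤ i ∧ i < hi) := by omega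
        simp [this])

lemma pv_merge_spec (total : Int) :
    ∀ (ivs m : List (Int × Int)),
    ivs.Pairwise (fun a b => a.1 ≤ b.1) →
    (∀ iv ∈ ivs, 0 ≤ iv.1 ∧ iv.2 ≤ total) →
    pvInv total m →
    (∀ a ∈ m, ∀ b ∈ ivs, a.1 ≤ b.1) →
    pvInv total (ivs.foldl pvMergeStep m) ∧
      ∀ i, pvMemIv (ivs.foldl pvMergeStep m) i = (pvMemIv m i || pvMemIv ivs i) := by
  intro ivs
  induction ivs with
  | nil =>
    intro m _ _ hinv _
    refine ⟨hinv, ?_⟩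
    intro i; simp [pvMemIv]
  | cons iv rest ih =>
    intro m hpw hbd hinv hall
    obtain ⟨lo, hi⟩ := iv
    have hbd0 := hbd (lo, hi) (List.mem_cons_self ..)
    have hrestle : ∀ b ∈ rest, lo ≤ b.1 := by
      intro b hm; exact (List.pairwise_cons.mp hpw).1 b hm
    simp only [List.foldl_cons]
    -- common continuation: it suffices to establish the invariants for m₁ = pvMergeStep m (lo,hi)
    have main : ∀ m₁ : List (Int × Int), m₁ = pvMergeStep m (lo, hi) →
        pvInv total m₁ →
        (∀ a ∈ m₁, ∀ b ∈ rest, a.1 ≤ b.1) →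
        (∀ i, pvMemIv m₁ i = (pvMemIv m i || decide (lo ≤ i ∧ i < hi))) →
        pvInv total (rest.foldl pvMergeStep m₁) ∧
          ∀ i, pvMemIv (rest.foldl pvMergeStep m₁) i
            = (pvMemIv m i || pvMemIv ((lo, hi) :: rest) i) := by
      intro m₁ hm₁ hinv₁ hall₁ hmem₁
      obtain ⟨h1, h2⟩ := ih m₁ (List.pairwise_cons.mp hpw).2
        (fun b hb => hbd b (List.mem_cons_of_mem _ hb)) hinv₁ hall₁
      refine ⟨h1, ?_⟩
      intro i
      rw [h2 i, hmem₁ i]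
      simp only [pvMemIv, List.any_cons]
      cases List.any m (fun iv => decide (iv.1 ≤ i ∧ i < iv.2)) <;> simp
    by_cases hskip : hi ≤ lo
    · -- empty interval: skipped
      have hstep : pvMergeStep m (lo, hi) = m := by simp [pvMergeStep, hskip]
      rw [hstep]
      refine main m hstep.symm hinv (fun a ha b hb => hall a ha b (List.mem_cons_of_mem _ hb)) ?_
      intro i
      have : ¬ (lo ≤ i ∧ i < hi) := by omega
      simp [this]
    · have hlohi : lo < hi := by omega
      cases hg : m.getLast? with
      | none =>
        have hmnil : m = [] := by cases m <;> simp_all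
        have hstep : pvMergeStep m (lo, hi) = [(lo, hi)] := by
          simp [pvMergeStep, hg, hskip]
        rw [hstep]
        refine main [(lo, hi)] hstep.symm ?_ ?_ ?_
        · exact ⟨by simp, by simp; omega⟩
        · intro a ha b hb; simp at ha; rw [ha]; exact hrestle b hb
        · intro i; simp [pvMemIv, hmnil]
      | some last =>
        have hmne : m ≠ [] := by intro h; rw [h] at hg; simp at hg
        have hlast : m.getLast hmne = last := by
          rw [List.getLast?_eq_some_getLast hmne] at hg; exact (Option.some_inj.mp hg)
        have hmdecomp : m.dropLast ++ [last] = m := by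
          rw [← hlast]; exact List.dropLast_append_getLast hmne
        have hlastmem : last ∈ m := by rw [← hmdecomp]; simp
        have hlast_lo : last.1 ≤ lo := hall last hlastmem (lo, hi) (List.mem_cons_self ..)
        have hlastbd := hinv.2 last hlastmem
        have hdlpw : ∀ a ∈ m.dropLast, a.2 < last.1 := by
          have := hinv.1
          rw [← hmdecomp] at this
          rw [List.pairwise_append] at this
          intro a ha; exact this.2.2 a ha last (by simp)
        have hdlmem : ∀ a ∈ m.dropLast, a ∈ m := by
          intro a ha; rw [← hmdecomp]; exact List.mem_append_left _ ha
        by_cases hov : lo ≤ last.2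
        · -- overlap/touch: extend the last interval
          have hstep : pvMergeStep m (lo, hi)
              = m.dropLast ++ [(last.1, max last.2 hi)] := by
            simp [pvMergeStep, hg, hskip, hov]
          rw [hstep]
          refine main _ hstep.symm ?_ ?_ ?_
          · constructor
            · rw [List.pairwise_append]
              have hdlpair : m.dropLast.Pairwise (fun a b => a.2 < b.1) := by
                have h0 := hinv.1
                rw [← hmdecomp] at h0
                exact (List.pairwise_append.mp h0).1
              refine ⟨hdlpair, by simp, ?_⟩
              intro a ha b hb; simp at hb; rw [hb]
              exact hdlpw a ha
            · intro a ha
              rcases List.mem_append.mp ha with h | h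
              · exact hinv.2 a (hdlmem a h)
              · simp at h; rw [h]; simp
                refine ⟨by omega, hlastbd.2.1, by omega⟩
          · intro a ha b hb
            rcases List.mem_append.mp ha with h | h
            · exact hall a (hdlmem a h) b (List.mem_cons_of_mem _ hb)
            · simp at h; rw [h]; exact le_trans hlast_lo (hrestle b hb)
          · intro i
            have hmm : pvMemIv m i = pvMemIv (m.dropLast ++ [last]) i := by rw [hmdecomp]
            rw [hmm]
            simp only [pvMemIv, List.any_append, List.any_cons, List.any_nil, Bool.or_false]
            have key : decide (last.1 ≤ i ∧ i < max last.2 hi)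
                = (decide (last.1 ≤ i ∧ i < last.2) || decide (lo ≤ i ∧ i < hi)) := by
              rw [← Bool.decide_or, decide_eq_decide]
              constructor
              · rintro ⟨h1, h2⟩
                by_cases hc : i < last.2
                · exact Or.inl ⟨h1, hc⟩
                · exact Or.inr ⟨by omega, by omega⟩
              · rintro (⟨h1, h2⟩ | ⟨h1, h2⟩) <;> constructor <;> omega
            rw [key, Bool.or_assoc]
        · -- gap: append a new interval
          have hstep : pvMergeStep m (lo, hi) = m ++ [(lo, hi)] := by
            simp [pvMergeStep, hg, hskip, hov]
          rw [hstep]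
          have hmlt : ∀ a ∈ m, a.2 < lo := by
            intro a ha
            rw [← hmdecomp] at ha
            rcases List.mem_append.mp ha with h | h
            · have := hdlpw a h; omega
            · simp at h; rw [h]; omega
          refine main _ hstep.symm ?_ ?_ ?_
          · constructor
            · rw [List.pairwise_append]
              exact ⟨hinv.1, by simp, fun a ha b hb => by simp at hb; rw [hb]; exact hmlt a ha⟩
            · intro a ha
              rcases List.mem_append.mp ha with h | h
              · exact hinv.2 a h
              · simp at h; rw [h]; exact ⟨hlohi, hbd0.1, hbd0.2⟩
          · intro a ha b hb
            rcases List.mem_append.mp ha with h | h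
            · exact hall a h b (List.mem_cons_of_mem _ hb)
            · simp at h; rw [h]; exact hrestle b hb
          · intro i
            simp [pvMemIv, List.any_append]

-- membership in A's include set
lemma pv_mem_include (changed : List Int) (f g : Int → Int) (x : Int) :
    (x ∈ changed.foldl (fun s ln =>
        (PySem.List.pyRange (f ln) (g ln) 1).foldl (fun s i => PySem.Set.add s i) s)
        PySem.Set.empty) ↔ ∃ ln ∈ changed, f ln ≤ x ∧ x < g ln := by
  have gen : ∀ (l : List Int) (s : PySem.Set Int),
      (x ∈ l.foldl (fun s ln =>
        (PySem.List.pyRange (f ln) (g ln) 1).foldl (fun s i => PySem.Set.add s i) s) s)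
      ↔ x ∈ s ∨ ∃ ln ∈ l, f ln ≤ x ∧ x < g ln := by
    intro l
    induction l with
    | nil => intro s; simp
    | cons a t ihl =>
      intro s
      simp only [List.foldl_cons, ihl, pv_mem_foldl_add, PySem.List.mem_pyRange_one]
      simp [List.mem_cons]
      tauto
  rw [gen]
  simp [PySem.Set.empty]

lemma pv_main_eq (lines : List String) (changed : List Int) (context : Int) :
    extract_relevant_window_py lines changed context
      = extract_relevant_window_py_alt lines changed context := by
  have htot : (0:Int) ≤ PySem.List.len lines := by simp [PySem.List.len_eq]
  set total : Int := PySem.List.len lines with htotdef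
  set emit : Int → String := fun i => pvFmt i (PySem.List.pyGetD lines i "") with hemit
  set ivs0 : List (Int × Int) :=
    changed.map (fun ln => (max 0 (ln - 1 - context), min total (ln - 1 + context + 1))) with hivs0
  set sivs : List (Int × Int) := PySem.List.sorted ivs0 (fun iv => iv.1) with hsivs
  set merged : List (Int × Int) := sivs.foldl pvMergeStep [] with hmerged
  -- properties of the merged intervals
  have hpw : sivs.Pairwise (fun a b => a.1 ≤ b.1) := PySem.List.sorted_pairwise ivs0 (fun iv => iv.1)
  have hbds : ∀ iv ∈ sivs, 0 ≤ iv.1 ∧ iv.2 ≤ total := by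
    intro iv hm
    rw [hsivs, PySem.List.mem_sorted] at hm
    rw [hivs0, List.mem_map] at hm
    obtain ⟨ln, _, h⟩ := hm
    rw [← h]
    constructor
    · exact le_max_left _ _
    · exact min_le_left _ _
  obtain ⟨hinv, hmemeq⟩ := pv_merge_spec total sivs [] hpw hbds
    ⟨List.Pairwise.nil, by simp⟩ (by simp)
  -- A's set membership equals interval membership of the merged list
  have hset : ∀ j : Int,
      PySem.Set.contains (changed.foldl (fun s ln =>
        (PySem.List.pyRange (max 0 (ln - 1 - context)) (min total (ln - 1 + context + 1)) 1).foldl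
          (fun s i => PySem.Set.add s i) s) PySem.Set.empty) j = pvMemIv merged j := by
    intro j
    rw [Bool.eq_iff_iff, PySem.Set.contains_iff,
        pv_mem_include changed (fun ln => max 0 (ln - 1 - context))
          (fun ln => min total (ln - 1 + context + 1)) j]
    rw [hmemeq j]
    simp only [pvMemIv, List.any_nil, Bool.false_or, List.any_eq_true, decide_eq_true_eq]
    constructor
    · rintro ⟨ln, hm, h1, h2⟩
      exact ⟨(max 0 (ln - 1 - context), min total (ln - 1 + context + 1)),
        by rw [hsivs, PySem.List.mem_sorted, hivs0]; exact List.mem_map_of_mem hm, h1, h2⟩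
    · rintro ⟨iv, hm, h1, h2⟩
      rw [hsivs, PySem.List.mem_sorted, hivs0, List.mem_map] at hm
      obtain ⟨ln, hmln, h⟩ := hm
      refine ⟨ln, hmln, ?_, ?_⟩
      · rw [← h] at h1; exact h1
      · rw [← h] at h2; exact h2
  -- rewrite A into the abstract scan and B into the abstract block emission
  have hA : extract_relevant_window_py lines changed context
      = ((PySem.List.pyRange 0 total 1).foldl (pvScanStep (pvMemIv merged) emit) ([], false)).1 := by
    show ((PySem.List.enumerate lines).foldl _ ([], false)).1 = _
    rw [PySem.List.enumerate_eq_map_pyRange lines "", List.foldl_map]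
    have : (fun (st : List String × Bool) (j : Int) =>
        (fun (st : List String × Bool) (p : Int × String) =>
          if PySem.Set.contains (changed.foldl (fun s ln =>
              (PySem.List.pyRange (max 0 (ln - 1 - context)) (min total (ln - 1 + context + 1)) 1).foldl
                (fun s i => PySem.Set.add s i) s) PySem.Set.empty) p.1 then
            ((if st.2 = false ∧ st.1 ≠ [] then st.1 ++ ["... (lines omitted) ..."] else st.1)
              ++ [pvFmt p.1 p.2], true)
          else (st.1, false)) st (j, PySem.List.pyGetD lines j ""))
        = pvScanStep (pvMemIv merged) emit := by
      funext st j
      simp only [pvScanStep, hset j, hemit]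
    exact congrArg (·.1) (congrArg (fun f => (PySem.List.pyRange 0 total 1).foldl f ([], false)) this)
  have hB : extract_relevant_window_py_alt lines changed context
      = merged.foldl (pvEmitStep emit) [] := rfl
  rw [hA, hB]
  exact pv_scan_blocks total (pvMemIv merged) emit merged 0 false [] hinv.1
    (fun iv hm => ⟨(hinv.2 iv hm).1, (hinv.2 iv hm).2.1, (hinv.2 iv hm).2.2⟩)
    (Or.inl rfl) (fun i _ _ => rfl)

-- ===== VERDICT (by name: the statement is the Claim_ definition above) =====
theorem extract_relevant_window_py_spec : Claim_equal_extract_relevant_window_py := by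
  intro lines changed_line_numbers context _
  show extract_relevant_window_py lines changed_line_numbers context
    = extract_relevant_window_py_alt lines changed_line_numbers context
  exact pv_main_eq lines changed_line_numbers context
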